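-- pv_equiv track=rewrite | github.com/ClemenceLVR/Terminator | Terminator/Main1703[Félix].py | addModifiers
-- ===== SOURCE A (Python) =====
-- def addModifiers(listValue, posValue, listModifiers, posModifiers):
--     newString = ''
--     if listValue!=[]: #s'il y a des val qualitatives
--         if listModifiers!=[]: #s'il y a des 'modifiers' dans la phrase
--             for i in posValue: #pour chaque position de la liste des positions
--                 ind_val = posValue.index(i) #on recupere l'indice de cette valeur dans sa liste
--                 for j in posModifiers: #pour tout modifier trouve
--                     ind_mod = posModifiers.index(j) #on recupere son indice dans la liste
--                     if j<i and newString=='': #si le modifier se situe avant la val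
--                         newString = listModifiers[ind_mod] + ' ' + listValue[ind_val] #on les associe
--                         listValue[ind_val]=newString #on remplace la nouvelle valeur dans la liste des valeurs
--     if newString!='':
--         return(listValue)
-- ===== SOURCE B (Python) =====
-- def addModifiers(listValue, posValue, listModifiers, posModifiers):
--     # same in-place mutation of listValue as the original on the updated slot
--     if not listValue or not listModifiers or not posModifiers:
--         return None
--     m = min(posModifiers)
--     for iv, v in enumerate(posValue):
--         if m < v:
--             jm = next(k for k, p in enumerate(posModifiers) if p < v)
--             listValue[iv] = listModifiers[jm] + ' ' + listValue[iv]
--             return listValue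
--     return None
-- ===== Notes on version B (the rewrite author's own statement) =====
-- stated objective: faster
-- what changed: A's nested scan (for every position, for every modifier, guarded by newString=='') is replaced by hoisting m = min(posModifiers) once and doing two first-hit linear scans with an early return: O(n+m) instead of O(n*m).
import Mathlib
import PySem

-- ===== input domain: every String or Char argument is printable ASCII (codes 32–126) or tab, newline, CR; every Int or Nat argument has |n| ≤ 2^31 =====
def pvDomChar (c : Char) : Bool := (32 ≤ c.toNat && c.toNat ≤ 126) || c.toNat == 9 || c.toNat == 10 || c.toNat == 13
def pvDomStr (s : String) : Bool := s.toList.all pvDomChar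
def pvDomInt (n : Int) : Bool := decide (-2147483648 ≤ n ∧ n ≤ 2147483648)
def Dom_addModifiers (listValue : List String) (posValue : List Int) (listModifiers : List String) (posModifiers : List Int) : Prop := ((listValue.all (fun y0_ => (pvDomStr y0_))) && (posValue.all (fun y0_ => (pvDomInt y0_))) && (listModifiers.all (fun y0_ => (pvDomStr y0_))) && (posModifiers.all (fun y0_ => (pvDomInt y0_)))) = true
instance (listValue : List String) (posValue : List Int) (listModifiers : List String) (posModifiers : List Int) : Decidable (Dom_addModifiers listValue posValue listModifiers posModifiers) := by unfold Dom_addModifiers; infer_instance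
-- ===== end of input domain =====

-- B replaces A's nested O(n·m) scan by hoisting min(posModifiers) and doing two linear
-- first-hit scans (objective: faster). Both A and B mutate listValue[i] in place the same
-- way; the equivalence proved here is about the return value.

-- ===== PORT A =====
-- state of A's loops: (newString, listValue); none = an exception (IndexError) was raised
def aInnerF (pm : List Int) (lm : List String) (i : Int) (indVal : Nat)
    (ost : Option (String × List String)) (j : Int) : Option (String × List String) :=
  match ost with
  | none => none
  | some (ns, lv) =>
    match PySem.List.index? pm j with
    | none => none
    | some indMod =>
      if j < i ∧ ns = "" then
        match PySem.List.pyGet? lm (indMod : Int), PySem.List.pyGet? lv (indVal : Int) with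
        | some ms, some vs => some (ms ++ " " ++ vs, lv.set indVal (ms ++ " " ++ vs))
        | _, _ => none
      else some (ns, lv)

def aOuterF (pv pm : List Int) (lm : List String)
    (ost : Option (String × List String)) (i : Int) : Option (String × List String) :=
  match ost with
  | none => none
  | some s =>
    match PySem.List.index? pv i with
    | none => none
    | some indVal => pm.foldl (aInnerF pm lm i indVal) (some s)

def addModifiers (listValue : List String) (posValue : List Int) (listModifiers : List String) (posModifiers : List Int) : Option (List String) :=
  let res : Option (String × List String) :=
    if listValue ≠ [] then
      if listModifiers ≠ [] then
        posValue.foldl (aOuterF posValue posModifiers listModifiers) (some ("", listValue))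
      else some ("", listValue)
    else some ("", listValue)
  match res with
  | none => none            -- A raised; excluded by Pre_addModifiers
  | some (ns, lv') => if ns ≠ "" then some lv' else none

-- ===== PORT B =====
-- B's enumerate loop: iv is the running index; returns at the first v with min < v
def altScan (lv lm : List String) (pm : List Int) (m : Int) (iv : Nat) : List Int → Option (List String)
  | [] => none
  | v :: rest =>
    if m < v then
      match List.findIdx? (fun p => decide (p < v)) pm with
      | none => none
      | some jm =>
        match PySem.List.pyGet? lm (jm : Int), PySem.List.pyGet? lv (iv : Int) with
        | some ms, some vs => some (lv.set iv (ms ++ " " ++ vs))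
        | _, _ => none
    else altScan lv lm pm m (iv + 1) rest

def addModifiers_alt (listValue : List String) (posValue : List Int) (listModifiers : List String) (posModifiers : List Int) : Option (List String) :=
  if listValue = [] ∨ listModifiers = [] ∨ posModifiers = [] then none
  else
    match PySem.List.min? posModifiers (fun x => x) with
    | none => none
    | some m => altScan listValue listModifiers posModifiers m 0 posValue

-- ===== PRECONDITION & SPEC =====
-- Pre_ excludes exactly the inputs on which A raises IndexError: the slot of the first
-- triggering value (or of its first matching modifier) lies beyond listValue/listModifiers.
def Pre_addModifiers (listValue : List String) (posValue : List Int) (listModifiers : List String) (posModifiers : List Int) : Prop :=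
  (listValue.isEmpty || listModifiers.isEmpty ||
    (match List.findIdx? (fun v => posModifiers.any (fun p => decide (p < v))) posValue with
     | none => true
     | some iv =>
       decide (iv < listValue.length) &&
       decide (List.findIdx (fun p => decide (p < posValue.getD iv 0)) posModifiers < listModifiers.length))) = true
instance (listValue : List String) (posValue : List Int) (listModifiers : List String) (posModifiers : List Int) : Decidable (Pre_addModifiers listValue posValue listModifiers posModifiers) := by unfold Pre_addModifiers; infer_instance

def pvWitness_addModifiers : List String × List Int × List String × List Int :=
  (["cat"], [2], ["big"], [1])

def Spec_addModifiers (listValue : List String) (posValue : List Int) (listModifiers : List String) (posModifiers : List Int) (out : Option (List String)) : Prop := out = addModifiers_alt listValue posValue listModifiers posModifiers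
instance (listValue : List String) (posValue : List Int) (listModifiers : List String) (posModifiers : List Int) (out : Option (List String)) : Decidable (Spec_addModifiers listValue posValue listModifiers posModifiers out) := by unfold Spec_addModifiers; infer_instance

-- ===== CLAIM (what is proved, stated in full; the proofs are below) =====
def Claim_equal_addModifiers : Prop := ∀ (listValue : List String) (posValue : List Int) (listModifiers : List String) (posModifiers : List Int), Dom_addModifiers listValue posValue listModifiers posModifiers → Pre_addModifiers listValue posValue listModifiers posModifiers → Spec_addModifiers listValue posValue listModifiers posModifiers (addModifiers listValue posValue listModifiers posModifiers)

-- ===== LEMMAS AND PROOFS =====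

lemma space_append_ne (ms vs : String) : ms ++ " " ++ vs ≠ "" := by
  intro h
  have h2 := congrArg String.toList h
  simp [String.toList_append] at h2

lemma aInner_none (pm : List Int) (lm : List String) (i : Int) (indVal : Nat) :
    ∀ sub : List Int, sub.foldl (aInnerF pm lm i indVal) none = none := by
  intro sub; induction sub with
  | nil => rfl
  | cons j t ih => simpa [aInnerF] using ih

lemma aInner_skip (pm : List Int) (lm : List String) (i : Int) (indVal : Nat)
    (ns : String) (lv : List String) (hns : ns ≠ "") :
    ∀ sub : List Int, (∀ j ∈ sub, j ∈ pm) →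
      sub.foldl (aInnerF pm lm i indVal) (some (ns, lv)) = some (ns, lv) := by
  intro sub; induction sub with
  | nil => intro _; rfl
  | cons j t ih =>
    intro hmem
    have hj : j ∈ pm := hmem j (List.mem_cons_self)
    obtain ⟨k, hk⟩ := Option.isSome_iff_exists.mp ((PySem.List.index?_isSome_iff pm j).mpr hj)
    have : aInnerF pm lm i indVal (some (ns, lv)) j = some (ns, lv) := by
      simp only [aInnerF, hk]
      simp [hns]
    rw [List.foldl_cons, this]
    exact ih (fun x hx => hmem x (List.mem_cons_of_mem _ hx))

lemma aInner_nofire (pm : List Int) (lm : List String) (i : Int) (indVal : Nat)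
    (lv : List String) :
    ∀ sub : List Int, (∀ j ∈ sub, j ∈ pm ∧ ¬ (j < i)) →
      sub.foldl (aInnerF pm lm i indVal) (some ("", lv)) = some ("", lv) := by
  intro sub; induction sub with
  | nil => intro _; rfl
  | cons j t ih =>
    intro hmem
    obtain ⟨hj, hlt⟩ := hmem j (List.mem_cons_self)
    obtain ⟨k, hk⟩ := Option.isSome_iff_exists.mp ((PySem.List.index?_isSome_iff pm j).mpr hj)
    have : aInnerF pm lm i indVal (some ("", lv)) j = some ("", lv) := by
      simp only [aInnerF, hk]
      simp [hlt]
    rw [List.foldl_cons, this]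
    exact ih (fun x hx => hmem x (List.mem_cons_of_mem _ hx))

-- decomposition of a list at the first index satisfying p
lemma first_hit {p : Int → Bool} {xs : List Int} (h : List.findIdx p xs < xs.length) :
    xs = xs.take (List.findIdx p xs) ++ xs[List.findIdx p xs] :: xs.drop (List.findIdx p xs + 1)
    ∧ (∀ x ∈ xs.take (List.findIdx p xs), p x = false)
    ∧ p xs[List.findIdx p xs] = true
    ∧ PySem.List.index? xs xs[List.findIdx p xs] = some (List.findIdx p xs) := by
  have htake : ∀ x ∈ xs.take (List.findIdx p xs), p x = false := by
    intro x hx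
    obtain ⟨k, hk, hxk⟩ := List.mem_iff_getElem.mp hx
    have hk' : k < List.findIdx p xs := lt_of_lt_of_le hk (by simp [List.length_take])
    have hpk := List.not_of_lt_findIdx (xs := xs) hk'
    rw [List.getElem_take] at hxk
    rw [← hxk]; exact hpk
  have hget : p xs[List.findIdx p xs] = true := List.findIdx_getElem (w := h)
  refine ⟨?_, htake, hget, ?_⟩
  · rw [List.getElem_cons_drop, List.take_append_drop]
  · rw [PySem.List.index?_eq_some_iff]
    refine ⟨xs.take (List.findIdx p xs), xs.drop (List.findIdx p xs + 1),
      by rw [List.getElem_cons_drop, List.take_append_drop], by simp [List.length_take, Nat.min_eq_left (le_of_lt h)], ?_⟩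
    intro hmem
    have := htake _ hmem
    simp [hget] at this

lemma aInner_fire (pm : List Int) (lm : List String) (i : Int) (indVal jm : Nat)
    (lv : List String) (hfind : List.findIdx? (fun p => decide (p < i)) pm = some jm) :
    pm.foldl (aInnerF pm lm i indVal) (some ("", lv)) =
      match PySem.List.pyGet? lm (jm : Int), PySem.List.pyGet? lv (indVal : Int) with
      | some ms, some vs => some (ms ++ " " ++ vs, lv.set indVal (ms ++ " " ++ vs))
      | _, _ => none := by
  obtain ⟨hlt, hidx⟩ := List.findIdx?_eq_some_iff_findIdx_eq.mp hfind
  subst hidx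
  obtain ⟨hdec, hpre, hget, hind⟩ := first_hit (p := fun p => decide (p < i)) hlt
  have hstep : aInnerF pm lm i indVal (some ("", lv)) pm[List.findIdx (fun p => decide (p < i)) pm] =
      match PySem.List.pyGet? lm ((List.findIdx (fun p => decide (p < i)) pm : Nat) : Int),
            PySem.List.pyGet? lv (indVal : Int) with
      | some ms, some vs => some (ms ++ " " ++ vs, lv.set indVal (ms ++ " " ++ vs))
      | _, _ => none := by
    simp only [aInnerF, hind]
    have : pm[List.findIdx (fun p => decide (p < i)) pm] < i := by simpa using hget
    simp [this]
  calc pm.foldl (aInnerF pm lm i indVal) (some ("", lv))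
      = (pm.take (List.findIdx (fun p => decide (p < i)) pm) ++
          pm[List.findIdx (fun p => decide (p < i)) pm] ::
          pm.drop (List.findIdx (fun p => decide (p < i)) pm + 1)).foldl
            (aInnerF pm lm i indVal) (some ("", lv)) := by rw [← hdec]
    _ = _ := by
      rw [List.foldl_append, aInner_nofire pm lm i indVal lv _
            (fun j hj => ⟨hdec ▸ List.mem_append_left _ hj, by simpa using hpre j hj⟩),
          List.foldl_cons, hstep]
      rcases h1 : PySem.List.pyGet? lm ((List.findIdx (fun p => decide (p < i)) pm : Nat) : Int) with _ | ms
      · simpa [h1] using aInner_none pm lm i indVal _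
      rcases h2 : PySem.List.pyGet? lv (indVal : Int) with _ | vs
      · simpa [h1, h2] using aInner_none pm lm i indVal _
      · exact aInner_skip pm lm i indVal _ _ (space_append_ne ms vs) _
          (fun j hj => hdec ▸ List.mem_append_right _ (List.mem_cons_of_mem _ hj))

lemma aOuter_skip (pv pm : List Int) (lm : List String) (ns : String) (lv : List String)
    (hns : ns ≠ "") :
    ∀ sub : List Int, (∀ i ∈ sub, i ∈ pv) →
      sub.foldl (aOuterF pv pm lm) (some (ns, lv)) = some (ns, lv) := by
  intro sub; induction sub with
  | nil => intro _; rfl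
  | cons i t ih =>
    intro hmem
    have hi : i ∈ pv := hmem i (List.mem_cons_self)
    obtain ⟨k, hk⟩ := Option.isSome_iff_exists.mp ((PySem.List.index?_isSome_iff pv i).mpr hi)
    have : aOuterF pv pm lm (some (ns, lv)) i = some (ns, lv) := by
      simp only [aOuterF, hk]
      exact aInner_skip pm lm i k ns lv hns pm (fun _ h => h)
    rw [List.foldl_cons, this]
    exact ih (fun x hx => hmem x (List.mem_cons_of_mem _ hx))

lemma aOuter_nofire (pv pm : List Int) (lm : List String) (lv : List String) :
    ∀ sub : List Int, (∀ i ∈ sub, i ∈ pv ∧ ∀ j ∈ pm, ¬ (j < i)) →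
      sub.foldl (aOuterF pv pm lm) (some ("", lv)) = some ("", lv) := by
  intro sub; induction sub with
  | nil => intro _; rfl
  | cons i t ih =>
    intro hmem
    obtain ⟨hi, hnof⟩ := hmem i (List.mem_cons_self)
    obtain ⟨k, hk⟩ := Option.isSome_iff_exists.mp ((PySem.List.index?_isSome_iff pv i).mpr hi)
    have : aOuterF pv pm lm (some ("", lv)) i = some ("", lv) := by
      simp only [aOuterF, hk]
      exact aInner_nofire pm lm i k lv pm (fun j hj => ⟨hj, hnof j hj⟩)
    rw [List.foldl_cons, this]
    exact ih (fun x hx => hmem x (List.mem_cons_of_mem _ hx))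

lemma altScan_none (lv lm : List String) (pm : List Int) (m : Int) :
    ∀ rest : List Int, (∀ v ∈ rest, ¬ m < v) → ∀ iv, altScan lv lm pm m iv rest = none := by
  intro rest; induction rest with
  | nil => intro _ _; rfl
  | cons v t ih =>
    intro h iv
    have : ¬ m < v := h v (List.mem_cons_self)
    rw [altScan, if_neg this]
    exact ih (fun x hx => h x (List.mem_cons_of_mem _ hx)) (iv + 1)

lemma altScan_skip (lv lm : List String) (pm : List Int) (m : Int) :
    ∀ (pre : List Int) (rest : List Int) (iv : Nat), (∀ x ∈ pre, ¬ m < x) →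
      altScan lv lm pm m iv (pre ++ rest) = altScan lv lm pm m (iv + pre.length) rest := by
  intro pre; induction pre with
  | nil => intro rest iv _; simp
  | cons x t ih =>
    intro rest iv h
    have hx : ¬ m < x := h x (List.mem_cons_self)
    rw [List.cons_append, altScan, if_neg hx,
        ih rest (iv + 1) (fun y hy => h y (List.mem_cons_of_mem _ hy))]
    congr 1
    simp [List.length_cons]
    omega

-- ===== VERDICT (by name: the statement is the Claim_ definition above) =====
theorem addModifiers_spec : Claim_equal_addModifiers := by
  intro lv pv lm pm _ hpre
  unfold Spec_addModifiers
  by_cases hlv : lv = []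
  · simp [addModifiers, addModifiers_alt, hlv]
  by_cases hlm : lm = []
  · simp [addModifiers, addModifiers_alt, hlm]
  by_cases hpm : pm = []
  · subst hpm
    have h0 : pv.foldl (aOuterF pv [] lm) (some ("", lv)) = some ("", lv) :=
      aOuter_nofire pv [] lm lv pv (fun i hi => ⟨hi, by simp⟩)
    simp [addModifiers, addModifiers_alt, hlv, hlm, h0]
  -- main case: all three nonempty
  obtain ⟨m, hm⟩ : ∃ m, PySem.List.min? pm (fun x => x) = some m := by
    rcases h : PySem.List.min? pm (fun x => x) with _ | m
    · exact absurd ((PySem.List.min?_eq_none_iff pm _).mp h) hpm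
    · exact ⟨m, rfl⟩
  have hmmem : m ∈ pm := PySem.List.min?_mem hm
  have hmmin : ∀ p ∈ pm, m ≤ p := PySem.List.min?_isMin hm
  have hPm : ∀ v : Int, (pm.any (fun p => decide (p < v)) = true) ↔ m < v := by
    intro v
    constructor
    · intro h
      obtain ⟨p, hp, hpv⟩ := List.any_eq_true.mp h
      exact lt_of_le_of_lt (hmmin p hp) (by simpa using hpv)
    · intro h
      exact List.any_eq_true.mpr ⟨m, hmmem, by simpa using h⟩
  unfold Pre_addModifiers at hpre
  rcases hfind : List.findIdx? (fun v => pm.any (fun p => decide (p < v))) pv with _ | ivx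
  · -- no value is preceded by any modifier: both return none
    have hno : ∀ v ∈ pv, ¬ pm.any (fun p => decide (p < v)) = true := by
      simpa using List.findIdx?_eq_none_iff.mp hfind
    have hA : pv.foldl (aOuterF pv pm lm) (some ("", lv)) = some ("", lv) :=
      aOuter_nofire pv pm lm lv pv (fun i hi =>
        ⟨hi, fun j hj hlt => hno i hi (List.any_eq_true.mpr ⟨j, hj, by simpa using hlt⟩)⟩)
    have hB : altScan lv lm pm m 0 pv = none :=
      altScan_none lv lm pm m pv (fun v hv hlt => hno v hv ((hPm v).mpr hlt)) 0
    simp [addModifiers, addModifiers_alt, hlv, hlm, hpm, hm, hA, hB]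
  · -- first triggering value at index ivx
    obtain ⟨hivlt, hfidx⟩ := List.findIdx?_eq_some_iff_findIdx_eq.mp hfind
    rw [hfind] at hpre
    simp [hlv, hlm] at hpre
    obtain ⟨hivlv, hjmlm⟩ := hpre
    obtain ⟨hdecV, hpreV, hgetV, hindV⟩ :=
      first_hit (p := fun v => pm.any (fun p => decide (p < v))) (hfidx ▸ hivlt)
    obtain ⟨v0, hv0⟩ : ∃ v0, pv[ivx]? = some v0 := ⟨pv[ivx]'hivlt, List.getElem?_eq_getElem hivlt⟩
    have hv0' : ∀ (h : ivx < pv.length), pv[ivx]'h = v0 := by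
      intro h
      have h2 := List.getElem?_eq_getElem h
      rw [hv0] at h2
      exact (Option.some.inj h2).symm
    simp only [hfidx] at hdecV hpreV hgetV hindV
    simp only [hv0'] at hdecV hgetV hindV
    simp only [hv0, Option.getD_some] at hjmlm
    set jm : Nat := List.findIdx (fun p => decide (p < v0)) pm with hjm
    have hjmpm : jm < pm.length := by
      apply List.findIdx_lt_length_of_exists
      obtain ⟨p, hp, hpv⟩ := List.any_eq_true.mp hgetV
      exact ⟨p, hp, hpv⟩
    have hfindM : List.findIdx? (fun p => decide (p < v0)) pm = some jm :=
      List.findIdx?_eq_some_iff_findIdx_eq.mpr ⟨hjmpm, rfl⟩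
    have hgetlm : PySem.List.pyGet? lm ((jm : Nat) : Int) = some (lm[jm]'hjmlm) := by
      rw [PySem.List.pyGet?_natCast]; exact List.getElem?_eq_getElem hjmlm
    have hgetlv : PySem.List.pyGet? lv ((ivx : Nat) : Int) = some (lv[ivx]'hivlv) := by
      rw [PySem.List.pyGet?_natCast]; exact List.getElem?_eq_getElem hivlv
    set ns' : String := lm[jm]'hjmlm ++ " " ++ lv[ivx]'hivlv with hns'
    -- A returns some (lv.set ivx ns')
    have hA : pv.foldl (aOuterF pv pm lm) (some ("", lv)) = some (ns', lv.set ivx ns') := by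
      calc pv.foldl (aOuterF pv pm lm) (some ("", lv))
          = (pv.take ivx ++ v0 :: pv.drop (ivx + 1)).foldl (aOuterF pv pm lm) (some ("", lv)) := by
            rw [← hdecV]
        _ = some (ns', lv.set ivx ns') := by
            rw [List.foldl_append]
            rw [aOuter_nofire pv pm lm lv _ (fun i hi =>
              ⟨hdecV ▸ List.mem_append_left _ hi, fun j hj hlt => by
                have h1 := hpreV i hi
                have h2 : pm.any (fun p => decide (p < i)) = true :=
                  List.any_eq_true.mpr ⟨j, hj, by simpa using hlt⟩
                rw [h1] at h2
                exact Bool.false_ne_true h2⟩)]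
            rw [List.foldl_cons]
            have hstep : aOuterF pv pm lm (some ("", lv)) v0 = some (ns', lv.set ivx ns') := by
              simp only [aOuterF, hindV]
              rw [aInner_fire pm lm v0 ivx jm lv hfindM]
              simp [hgetlm, hgetlv, ← hns']
            rw [hstep]
            exact aOuter_skip pv pm lm ns' _ (space_append_ne _ _) _
              (fun i hi => hdecV ▸ List.mem_append_right _ (List.mem_cons_of_mem _ hi))
    -- B returns the same
    have hB : altScan lv lm pm m 0 pv = some (lv.set ivx ns') := by
      calc altScan lv lm pm m 0 pv
          = altScan lv lm pm m 0 (pv.take ivx ++ v0 :: pv.drop (ivx + 1)) := by rw [← hdecV]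
        _ = altScan lv lm pm m (0 + (pv.take ivx).length) (v0 :: pv.drop (ivx + 1)) :=
            altScan_skip lv lm pm m _ _ 0 (fun x hx hlt => by
              have h1 := hpreV x hx
              have h2 := (hPm x).mpr hlt
              rw [h1] at h2
              exact Bool.false_ne_true h2)
        _ = some (lv.set ivx ns') := by
            have hlen : (pv.take ivx).length = ivx := by
              simp [List.length_take, Nat.min_eq_left (le_of_lt hivlt)]
            rw [hlen, Nat.zero_add, altScan, if_pos ((hPm v0).mp hgetV), hfindM]
            simp [hgetlm, hgetlv, ← hns']
    simp [addModifiers, addModifiers_alt, hlv, hlm, hpm, hm, hA, hB]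
    rw [hns']
    exact space_append_ne _ _
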